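-- pv_equiv track=rewrite | github.com/S-A-I-V/CodeForcesProblem | sumofmaxmultiplesum.py | maxmulsum
-- ===== SOURCE A (Python) =====
-- def maxmulsum(testcase):
--     max_sum = 0
--     optimal_x = 2
--
--     for x in range(2, testcase + 1):
--         k = testcase // x
--         multiple_sum = (k * (k + 1) // 2) * x
--
--         if multiple_sum > max_sum:
--             max_sum = multiple_sum
--             optimal_x = x
--
--     return (optimal_x)
-- ===== SOURCE B (Python) =====
-- def maxmulsum(testcase):
--     # Closed form: for n >= 4 the multiples of 2 give the dominant sum
--     # (k*(k+1) with k = n//2 beats q*(q+1)//2*x for every x >= 3);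
--     # n == 3 is the unique input where x = 3 wins. For n < 2 the loop
--     # of the original is empty and the default 2 is returned.
--     return 3 if testcase == 3 else 2
-- ===== Notes on version B (the rewrite author's own statement) =====
-- stated objective: faster
-- what changed: Replaced the O(n) scan over all candidate divisors by the closed form: the answer is 3 for n == 3 and 2 otherwise, proved via the inequality q*(q+1)//2*x <= k*(k+1) for k = n//2, x >= 3, n >= 4.
import Mathlib
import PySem

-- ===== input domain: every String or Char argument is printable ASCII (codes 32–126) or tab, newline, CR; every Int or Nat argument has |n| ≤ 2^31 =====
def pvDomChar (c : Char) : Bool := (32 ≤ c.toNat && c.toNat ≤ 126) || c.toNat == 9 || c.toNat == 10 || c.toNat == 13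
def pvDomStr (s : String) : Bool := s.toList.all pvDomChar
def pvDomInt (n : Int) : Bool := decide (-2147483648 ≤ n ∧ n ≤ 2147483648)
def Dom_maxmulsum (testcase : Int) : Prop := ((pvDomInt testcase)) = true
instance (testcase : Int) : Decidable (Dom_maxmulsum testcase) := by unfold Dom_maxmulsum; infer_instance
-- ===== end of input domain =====

-- B replaces A's O(n) scan over all candidates by the proved closed form (3 for n = 3, else 2); faster (asymptotic).


-- ===== PORT A =====
-- loop body of A: k = testcase // x; multiple_sum = (k*(k+1)//2)*x; update (max_sum, optimal_x)
def pvStep (n : Int) (st : Int × Int) (x : Int) : Int × Int :=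
  let k := PySem.Int.floordiv n x
  let multiple_sum := PySem.Int.floordiv (k * (k + 1)) 2 * x
  if multiple_sum > st.1 then (multiple_sum, x) else st

def maxmulsum (testcase : Int) : Int :=
  ((PySem.List.pyRange 2 (testcase + 1) 1).foldl (pvStep testcase) (0, 2)).2

-- ===== PORT B =====
def maxmulsum_alt (testcase : Int) : Int :=
  if testcase = 3 then 3 else 2

-- ===== PRECONDITION & SPEC =====
def Spec_maxmulsum (testcase : Int) (out : Int) : Prop := out = maxmulsum_alt testcase
instance (testcase : Int) (out : Int) : Decidable (Spec_maxmulsum testcase out) := by unfold Spec_maxmulsum; infer_instance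

-- ===== CLAIM (what is proved, stated in full; the proofs are below) =====
def Claim_equal_maxmulsum : Prop := ∀ (testcase : Int), Dom_maxmulsum testcase → Spec_maxmulsum testcase (maxmulsum testcase)

-- ===== LEMMAS AND PROOFS =====

-- key inequality: for n ≥ 4 the candidate x = 2 dominates every x ∈ [3, n]
lemma pv_key (n x : Int) (hn : 4 ≤ n) (hx3 : 3 ≤ x) (hxn : x ≤ n) :
    PySem.Int.floordiv (PySem.Int.floordiv n x * (PySem.Int.floordiv n x + 1)) 2 * x
      ≤ PySem.Int.floordiv (PySem.Int.floordiv n 2 * (PySem.Int.floordiv n 2 + 1)) 2 * 2 := by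
  rcases le_or_gt 7 n with h7 | h7
  · rw [PySem.Int.floordiv_eq_ediv_of_pos (show (0:Int) < x by omega)]
    simp only [PySem.Int.floordiv_eq_ediv_of_pos (show (0:Int) < 2 by norm_num)]
    have hq0 : 0 ≤ n / x := Int.ediv_nonneg (by omega) (by omega)
    have hdm := Int.mul_ediv_add_emod n x
    have hr0 := Int.emod_nonneg n (show x ≠ 0 by omega)
    have hqx : x * (n / x) ≤ n := by omega
    have h3q : 3 * (n / x) ≤ n :=
      le_trans (mul_le_mul_of_nonneg_right hx3 hq0) hqx
    have hevq : n / x * (n / x + 1) / 2 * 2 = n / x * (n / x + 1) := by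
      refine Int.ediv_mul_cancel ?_
      obtain ⟨r, hr⟩ := Int.even_mul_succ_self (n / x)
      exact ⟨r, by omega⟩
    have hevk : n / 2 * (n / 2 + 1) / 2 * 2 = n / 2 * (n / 2 + 1) := by
      refine Int.ediv_mul_cancel ?_
      obtain ⟨r, hr⟩ := Int.even_mul_succ_self (n / 2)
      exact ⟨r, by omega⟩
    have hk1 : 2 * (n / 2) ≤ n := by omega
    have hk2 : n ≤ 2 * (n / 2) + 1 := by omega
    refine le_of_mul_le_mul_right ?_ (show (0:Int) < 2 by norm_num)
    have hre : n / x * (n / x + 1) / 2 * x * 2 = n / x * (n / x + 1) / 2 * 2 * x := by ring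
    rw [hre, hevq]
    rw [show n / 2 * (n / 2 + 1) / 2 * 2 * 2 = (n / 2 * (n / 2 + 1) / 2 * 2) * 2 from by ring, hevk]
    -- goal: n/x * (n/x + 1) * x ≤ n/2 * (n/2 + 1) * 2
    have hs1 : x * (n / x) * (n / x + 1) ≤ n * (n / x + 1) :=
      mul_le_mul_of_nonneg_right hqx (by omega)
    nlinarith [mul_le_mul_of_nonneg_left h3q (show (0:Int) ≤ n by omega),
               mul_nonneg (show (0:Int) ≤ 2 * (n / 2) + 1 - n by omega) (show (0:Int) ≤ n - 1 by omega),
               sq_nonneg (2 * (n / 2) + 1 - n),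
               mul_nonneg (show (0:Int) ≤ n - 7 by omega) (show (0:Int) ≤ n + 1 by omega)]
  · interval_cases n <;> interval_cases x <;> decide

lemma pv_fold_const (n M o : Int) (L : List Int)
    (h : ∀ x ∈ L, PySem.Int.floordiv (PySem.Int.floordiv n x * (PySem.Int.floordiv n x + 1)) 2 * x ≤ M) :
    L.foldl (pvStep n) (M, o) = (M, o) := by
  induction L with
  | nil => rfl
  | cons a L ih =>
    rw [List.foldl_cons]
    have hna : ¬ (PySem.Int.floordiv (PySem.Int.floordiv n a * (PySem.Int.floordiv n a + 1)) 2 * a > M) :=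
      not_lt.mpr (h a (List.mem_cons_self ..))
    simp only [pvStep]
    rw [if_neg hna]
    exact ih (fun x hx => h x (List.mem_cons_of_mem _ hx))

lemma pv_f2_pos (n : Int) (hn : 4 ≤ n) :
    0 < PySem.Int.floordiv (PySem.Int.floordiv n 2 * (PySem.Int.floordiv n 2 + 1)) 2 * 2 := by
  simp only [PySem.Int.floordiv_eq_ediv_of_pos (show (0:Int) < 2 by norm_num)]
  have hevk : n / 2 * (n / 2 + 1) / 2 * 2 = n / 2 * (n / 2 + 1) := by
    refine Int.ediv_mul_cancel ?_
    obtain ⟨r, hr⟩ := Int.even_mul_succ_self (n / 2)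
    exact ⟨r, by omega⟩
  rw [hevk]
  have : 2 ≤ n / 2 := by omega
  nlinarith

-- ===== VERDICT (by name: the statement is the Claim_ definition above) =====
theorem maxmulsum_spec : Claim_equal_maxmulsum := by
  intro n _
  show maxmulsum n = maxmulsum_alt n
  by_cases h4 : 4 ≤ n
  · unfold maxmulsum maxmulsum_alt
    rw [if_neg (show ¬ n = 3 by omega)]
    rw [PySem.List.pyRange_one_cons (show (2:Int) < n + 1 by omega), List.foldl_cons]
    have hstep2 : pvStep n (0, 2) 2 =
        (PySem.Int.floordiv (PySem.Int.floordiv n 2 * (PySem.Int.floordiv n 2 + 1)) 2 * 2, 2) := by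
      simp only [pvStep]
      rw [if_pos (pv_f2_pos n h4)]
    rw [hstep2, pv_fold_const n _ 2 _ ?_]
    intro x hx
    rw [PySem.List.mem_pyRange_one] at hx
    exact pv_key n x h4 hx.1 (by omega)
  · rcases eq_or_ne n 3 with rfl | h3
    · decide
    · rcases eq_or_ne n 2 with rfl | h2
      · decide
      · have h1 : n ≤ 1 := by omega
        unfold maxmulsum maxmulsum_alt
        rw [PySem.List.pyRange_one_eq_nil (by omega), if_neg h3]
        rfl
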